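-- pv_equiv track=rewrite | github.com/appu554/cardiofit_2026 | backend/services/medication-service/app/domain/services/priority_resolver.py | _find_independent_groups
-- ===== SOURCE A (Python) =====
-- from typing import Dict, List, Any, Optional, Set, Tuple
--
-- def _find_independent_groups(rule_contexts: List[Tuple[str, str]]) -> List[List[str]]:
--     """Find groups of independent rules"""
--
--     # Define independent dimensions
--     independent_dimensions = {
--         "safety": ["drug_interaction", "allergy", "contraindication"],
--         "dosing": ["renal_adjustment", "hepatic_adjustment", "weight_based"],
--         "monitoring": ["therapeutic_monitoring", "safety_monitoring", "lab_monitoring"],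
--         "administration": ["iv_compatibility", "food_interaction", "timing"]
--     }
--
--     groups = []
--     for dimension, patterns in independent_dimensions.items():
--         group = []
--         for rule_id, context in rule_contexts:
--             if any(pattern in context for pattern in patterns):
--                 group.append(rule_id)
--         if len(group) > 1:
--             groups.append(group)
--
--     return groups
-- ===== SOURCE B (Python) =====
-- from typing import List, Tuple
--
-- # Flat map: pattern -> dimension index (0=safety, 1=dosing, 2=monitoring, 3=administration)
-- _PATTERN_DIM = {
--     "drug_interaction": 0, "allergy": 0, "contraindication": 0,
--     "renal_adjustment": 1, "hepatic_adjustment": 1, "weight_based": 1,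
--     "therapeutic_monitoring": 2, "safety_monitoring": 2, "lab_monitoring": 2,
--     "iv_compatibility": 3, "food_interaction": 3, "timing": 3,
-- }
--
-- def _find_independent_groups(rule_contexts: List[Tuple[str, str]]) -> List[List[str]]:
--     """Find groups of independent rules.
--
--     Stage 1: annotate each rule with the SET of dimension indices whose patterns
--     occur in its context, using one flat pattern->dimension map.
--     Stage 2: for each dimension index, extract the ids tagged with it; keep
--     the lists with more than one member.
--     """
--     tagged = [(rid, {d for p, d in _PATTERN_DIM.items() if p in ctx})
--               for rid, ctx in rule_contexts]
--     extracted = ([rid for rid, dims in tagged if d in dims] for d in range(4))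
--     return [g for g in extracted if len(g) > 1]
-- ===== Notes on version B (the rewrite author's own statement) =====
-- stated objective: alternative
-- what changed: B replaces A's four scans testing nested per-dimension pattern lists by a staged computation: a single flat pattern-to-dimension map tags each rule once with the set of dimension indices matching its context, then each dimension's group is extracted from the tags and groups with more than one member are kept in dimension order.
import Mathlib
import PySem

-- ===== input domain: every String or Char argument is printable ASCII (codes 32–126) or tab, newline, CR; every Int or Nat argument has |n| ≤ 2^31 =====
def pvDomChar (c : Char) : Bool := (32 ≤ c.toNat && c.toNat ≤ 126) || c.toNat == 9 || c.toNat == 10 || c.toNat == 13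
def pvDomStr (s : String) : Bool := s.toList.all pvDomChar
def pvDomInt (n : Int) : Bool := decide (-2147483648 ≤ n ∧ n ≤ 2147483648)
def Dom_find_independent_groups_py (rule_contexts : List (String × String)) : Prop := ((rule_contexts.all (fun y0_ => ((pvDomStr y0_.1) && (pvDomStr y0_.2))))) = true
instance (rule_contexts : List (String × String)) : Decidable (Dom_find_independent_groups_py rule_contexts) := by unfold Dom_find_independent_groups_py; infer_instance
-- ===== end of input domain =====

-- B replaces A's per-dimension scans testing nested pattern lists by a staged computation:
-- one flat pattern->dimension map tags each rule with the set of dimensions it matches,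
-- then each dimension's group is extracted from the tags; objective: alternative decomposition.

-- ===== PORT A =====
-- A's dict literal independent_dimensions, iterated in insertion order via .items()
def pvDimsA : List (String × List String) :=
  [("safety", ["drug_interaction", "allergy", "contraindication"]),
   ("dosing", ["renal_adjustment", "hepatic_adjustment", "weight_based"]),
   ("monitoring", ["therapeutic_monitoring", "safety_monitoring", "lab_monitoring"]),
   ("administration", ["iv_compatibility", "food_interaction", "timing"])]

def find_independent_groups_py (rule_contexts : List (String × String)) : List (List String) :=
  pvDimsA.foldl (fun groups dp =>
    let group := rule_contexts.foldl (fun g rc =>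
      if dp.2.any (fun pattern => PySem.Str.isIn pattern rc.2) then g ++ [rc.1] else g) []
    if group.length > 1 then groups ++ [group] else groups) []

-- ===== PORT B =====
-- B's flat dict _PATTERN_DIM : pattern -> dimension index
def pvPatternDim : List (String × Int) :=
  [("drug_interaction", 0), ("allergy", 0), ("contraindication", 0),
   ("renal_adjustment", 1), ("hepatic_adjustment", 1), ("weight_based", 1),
   ("therapeutic_monitoring", 2), ("safety_monitoring", 2), ("lab_monitoring", 2),
   ("iv_compatibility", 3), ("food_interaction", 3), ("timing", 3)]

def find_independent_groups_py_alt (rule_contexts : List (String × String)) : List (List String) :=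
  -- tagged = [(rid, {d for p, d in _PATTERN_DIM.items() if p in ctx}) for rid, ctx in rule_contexts]
  let tagged := rule_contexts.map (fun rc =>
    (rc.1, PySem.Set.ofList
       ((pvPatternDim.filter (fun pd => PySem.Str.isIn pd.1 rc.2)).map Prod.snd)))
  -- extracted = ([rid for rid, dims in tagged if d in dims] for d in range(4))
  let extracted := (PySem.List.pyRange 0 4 1).map (fun d =>
    (tagged.filter (fun t => PySem.Set.contains t.2 d)).map Prod.fst)
  -- [g for g in extracted if len(g) > 1]
  extracted.filter (fun g => g.length > 1)

-- ===== PRECONDITION & SPEC =====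
def Spec_find_independent_groups_py (rule_contexts : List (String × String)) (out : List (List String)) : Prop := out = find_independent_groups_py_alt rule_contexts
instance (rule_contexts : List (String × String)) (out : List (List String)) : Decidable (Spec_find_independent_groups_py rule_contexts out) := by unfold Spec_find_independent_groups_py; infer_instance

-- ===== CLAIM (what is proved, stated in full; the proofs are below) =====
def Claim_equal_find_independent_groups_py : Prop := ∀ (rule_contexts : List (String × String)), Dom_find_independent_groups_py rule_contexts → Spec_find_independent_groups_py rule_contexts (find_independent_groups_py rule_contexts)

-- ===== LEMMAS AND PROOFS =====

-- A's inner loop over the rules is a filter-then-project.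
theorem pvA_inner (m : String × String → Bool) (rcs : List (String × String)) (acc : List String) :
    rcs.foldl (fun g rc => if m rc then g ++ [rc.1] else g) acc
      = acc ++ (rcs.filter m).map Prod.fst := by
  induction rcs generalizing acc with
  | nil => simp
  | cons rc rest ih =>
    by_cases h : m rc = true <;> simp [List.foldl, h, ih]

-- A's outer loop over the dimensions: compute each group, keep those longer than 1.
theorem pvA_outer (rcs : List (String × String)) (dims : List (String × List String))
    (acc : List (List String)) :
    dims.foldl (fun groups dp =>
      let group := rcs.foldl (fun g rc =>
        if dp.2.any (fun pattern => PySem.Str.isIn pattern rc.2) then g ++ [rc.1] else g) []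
      if group.length > 1 then groups ++ [group] else groups) acc
      = acc ++ (dims.map (fun dp =>
          (rcs.filter (fun rc => dp.2.any (fun pattern => PySem.Str.isIn pattern rc.2))).map
            Prod.fst)).filter (fun g => g.length > 1) := by
  induction dims generalizing acc with
  | nil => simp
  | cons dp rest ih =>
    rw [List.foldl_cons]
    rw [show (rcs.foldl (fun g rc =>
        if dp.2.any (fun pattern => PySem.Str.isIn pattern rc.2) then g ++ [rc.1] else g)
        ([] : List String))
      = (rcs.filter (fun rc => dp.2.any (fun pattern => PySem.Str.isIn pattern rc.2))).map
          Prod.fst from (pvA_inner _ rcs []).trans (List.nil_append _)]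
    rw [ih]
    simp only [List.map_cons, List.filter_cons, decide_eq_true_eq]
    split_ifs with h <;> simp [List.append_assoc]

-- A rule's tag set contains dimension d iff one of dimension d's patterns is in the context.
theorem pvTag_mem (ctx : String) (d : Int) (hd : d ∈ ([0, 1, 2, 3] : List Int)) :
    PySem.Set.contains
      (PySem.Set.ofList ((pvPatternDim.filter (fun pd => PySem.Str.isIn pd.1 ctx)).map Prod.snd)) d
      = ((pvDimsA.map Prod.snd).getD d.toNat []).any (fun p => PySem.Str.isIn p ctx) := by
  fin_cases hd <;>
    simp [PySem.Set.contains, PySem.Set.mem_ofList, List.mem_map, List.mem_filter,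
      pvPatternDim, pvDimsA]

-- Extracting dimension d's ids from the tagged rules equals A's scan for that dimension.
theorem pvExtract (rcs : List (String × String)) (d : Int) (hd : d ∈ ([0, 1, 2, 3] : List Int)) :
    ((rcs.map (fun rc =>
        (rc.1, PySem.Set.ofList
          ((pvPatternDim.filter (fun pd => PySem.Str.isIn pd.1 rc.2)).map Prod.snd)))).filter
        (fun t => PySem.Set.contains t.2 d)).map Prod.fst
      = (rcs.filter (fun rc =>
          (((pvDimsA.map Prod.snd).getD d.toNat []).any (fun p => PySem.Str.isIn p rc.2)))).map
          Prod.fst := by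
  induction rcs with
  | nil => rfl
  | cons rc rest ih =>
    simp only [List.map_cons, List.filter_cons]
    rw [pvTag_mem rc.2 d hd]
    split_ifs with h
    · simp only [List.map_cons, ih]
    · exact ih

-- ===== VERDICT (by name: the statement is the Claim_ definition above) =====
theorem find_independent_groups_py_spec : Claim_equal_find_independent_groups_py := by
  intro rcs _
  unfold Spec_find_independent_groups_py find_independent_groups_py find_independent_groups_py_alt
  rw [pvA_outer]
  rw [show PySem.List.pyRange 0 4 1 = [0, 1, 2, 3] from by decide]
  simp only [List.map_cons, List.map_nil, List.nil_append]
  rw [pvExtract rcs 0 (by decide), pvExtract rcs 1 (by decide),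
      pvExtract rcs 2 (by decide), pvExtract rcs 3 (by decide)]
  simp [pvDimsA]
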